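-- pv_equiv track=rewrite | github.com/nicoaira/rna_alignment_generator_py | real_time_alignment.py | _merge_column_order
-- ===== SOURCE A (Python) =====
-- from typing import Any, Dict, List, Optional, Tuple
--
-- def _merge_column_order(parent_cols: List[int], child_cols: List[int]) -> List[int]:
--     order = list(parent_cols)
--     position = {col: idx for idx, col in enumerate(order)}
--
--     for idx, col in enumerate(child_cols):
--         if col in position:
--             continue
--         left_pos = None
--         for j in range(idx - 1, -1, -1):
--             prev_col = child_cols[j]
--             if prev_col in position:
--                 left_pos = position[prev_col]
--                 break
--         right_pos = None
--         for j in range(idx + 1, len(child_cols)):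
--             next_col = child_cols[j]
--             if next_col in position:
--                 right_pos = position[next_col]
--                 break
--         if left_pos is not None:
--             insert_at = left_pos + 1
--         elif right_pos is not None:
--             insert_at = right_pos
--         else:
--             insert_at = len(order)
--         order.insert(insert_at, col)
--         # Update cached positions from insert point onwards
--         for k in range(insert_at, len(order)):
--             position[order[k]] = k
--     return order
-- ===== SOURCE B (Python) =====
-- from typing import List
--
--
-- def _merge_column_order(parent_cols: List[int], child_cols: List[int]) -> List[int]:
--     # Linked-list merge: order is kept as a singly linked list of nodes
--     # (vals[i], nxt[i]), with node 0 a head sentinel.  node_of maps each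
--     # value to the node of its last occurrence.  Every already-processed
--     # child column is present, so each new column is spliced in O(1)
--     # right after the previous child column's node; only the very first
--     # child column may search forward for an anchor (one O(n) scan).
--     n = len(parent_cols)
--     vals = [0] + list(parent_cols)
--     nxt = [i + 1 for i in range(n)] + [None]
--     node_of = {v: i + 1 for i, v in enumerate(parent_cols)}
--
--     for idx, col in enumerate(child_cols):
--         if col in node_of:
--             continue
--         if idx == 0:
--             anchor = next((c for c in child_cols[1:] if c in node_of), None)
--             if anchor is None:
--                 # append at the end: walk to the last node
--                 q = 0
--                 while nxt[q] is not None: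
--                     q = nxt[q]
--                 vals.append(col)
--                 nxt.append(None)
--                 nxt[q] = len(vals) - 1
--             else:
--                 # insert just before the anchor's node: walk to its predecessor
--                 a = node_of[anchor]
--                 q = 0
--                 while nxt[q] != a:
--                     q = nxt[q]
--                 vals.append(col)
--                 nxt.append(a)
--                 nxt[q] = len(vals) - 1
--         else:
--             p = node_of[child_cols[idx - 1]]
--             vals.append(col)
--             nxt.append(nxt[p])
--             nxt[p] = len(vals) - 1
--         node_of[col] = len(vals) - 1
--
--     out = []
--     i = nxt[0]
--     while i is not None:
--         out.append(vals[i])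
--         i = nxt[i]
--     return out
-- ===== Notes on version B (the rewrite author's own statement) =====
-- stated objective: faster
-- what changed: B replaces A's array-insert-plus-position-dict-refresh (and its two rescans of child_cols) by a singly linked list of nodes with a value-to-node map, splicing each new column in O(1) after the previous child column's node; only the very first child column does one O(n) scan.
import Mathlib
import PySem

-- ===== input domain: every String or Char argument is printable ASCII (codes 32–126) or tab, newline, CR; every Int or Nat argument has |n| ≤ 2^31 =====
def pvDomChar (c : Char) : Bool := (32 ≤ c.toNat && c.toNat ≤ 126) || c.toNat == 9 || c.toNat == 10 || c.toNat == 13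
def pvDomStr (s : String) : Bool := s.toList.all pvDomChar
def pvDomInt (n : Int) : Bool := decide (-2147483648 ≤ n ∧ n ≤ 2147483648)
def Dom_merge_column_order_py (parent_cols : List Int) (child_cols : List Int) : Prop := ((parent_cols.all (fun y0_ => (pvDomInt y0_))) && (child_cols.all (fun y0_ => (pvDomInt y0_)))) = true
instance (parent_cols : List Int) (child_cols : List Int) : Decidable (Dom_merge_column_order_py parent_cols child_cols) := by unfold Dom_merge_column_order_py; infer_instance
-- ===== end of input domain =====

-- B keeps the order as a singly linked list of nodes plus a value→node map, splicing each new
-- column in O(1) after the previous child column's node instead of A's array insert with an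
-- O(n) position-dict refresh; the return values are identical.

-- ===== PORT A =====
-- the `for j in range(...)` scans with `break`: first j whose column is a key of `position`;
-- cs[j] is always in range at every call site, so `(pyGet? …).getD 0` is exact
def pvScanA (cs : List Int) (pos : PySem.Dict Int Int) : List Int → Option Int
  | [] => none
  | j :: js =>
    let c := (PySem.List.pyGet? cs j).getD 0
    if pos.contains c then pos.get? c else pvScanA cs pos js

def pvStepA (cs : List Int) (st : List Int × PySem.Dict Int Int) (p : Int × Int) :
    List Int × PySem.Dict Int Int :=
  if st.2.contains p.2 then st
  else
    let left := pvScanA cs st.2 (PySem.List.pyRange (p.1 - 1) (-1) (-1))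
    let right := pvScanA cs st.2 (PySem.List.pyRange (p.1 + 1) (cs.length : Int) 1)
    let insert_at : Int :=
      match left with
      | some l => l + 1
      | none =>
        match right with
        | some r => r
        | none => (st.1.length : Int)
    let order' := PySem.List.insert st.1 insert_at p.2
    let pos' := (PySem.List.pyRange insert_at (order'.length : Int) 1).foldl
      (fun d k => d.insert ((PySem.List.pyGet? order' k).getD 0) k) st.2
    (order', pos')

def merge_column_order_py (parent_cols : List Int) (child_cols : List Int) : List Int :=
  let pos0 := (PySem.List.enumerate parent_cols).foldl
    (fun d p => d.insert p.2 p.1) (PySem.Dict.empty)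
  ((PySem.List.enumerate child_cols).foldl (pvStepA child_cols) (parent_cols, pos0)).1

-- ===== PORT B =====
-- Source B's node indices are nonnegative by construction and its `None` next-pointer is an
-- Option; the two `while` loops walk a finite acyclic chain, ported with fuel `vals.length`
-- (an upper bound on the chain length, exact on every state B builds).

-- `q = 0; while nxt[q] is not None: q = nxt[q]`
def pvFindLast (nxt : List (Option Nat)) : Nat → Nat → Nat
  | 0, q => q
  | fuel + 1, q =>
    match nxt.getD q none with
    | none => q
    | some q' => pvFindLast nxt fuel q'

-- `q = 0; while nxt[q] != a: q = nxt[q]`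
def pvFindPred (nxt : List (Option Nat)) (a : Nat) : Nat → Nat → Nat
  | 0, q => q
  | fuel + 1, q =>
    if nxt.getD q none = some a then q
    else
      match nxt.getD q none with
      | some q' => pvFindPred nxt a fuel q'
      | none => q   -- unreachable: a is on the chain

-- `i = nxt[0]; while i is not None: out.append(vals[i]); i = nxt[i]`
def pvWalk (vals : List Int) (nxt : List (Option Nat)) : Nat → Option Nat → List Int
  | _, none => []
  | 0, some _ => []
  | fuel + 1, some i => vals.getD i 0 :: pvWalk vals nxt fuel (nxt.getD i none)

def pvStepB (cs : List Int) (st : List Int × List (Option Nat) × PySem.Dict Int Nat)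
    (p : Int × Int) : List Int × List (Option Nat) × PySem.Dict Int Nat :=
  let vals := st.1
  let nxt := st.2.1
  let node_of := st.2.2
  if node_of.contains p.2 then st
  else
    let vn :=
      if p.1 = 0 then
        match (PySem.List.slice cs (some 1)).find? (fun c => node_of.contains c) with
        | none =>
          let q := pvFindLast nxt vals.length 0
          (vals ++ [p.2], (nxt ++ [none]).set q (some vals.length))
        | some a =>
          let an := (node_of.get? a).getD 0
          let q := pvFindPred nxt an vals.length 0
          (vals ++ [p.2], (nxt ++ [some an]).set q (some vals.length))
      else
        let pn := (node_of.get? ((PySem.List.pyGet? cs (p.1 - 1)).getD 0)).getD 0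
        (vals ++ [p.2], (nxt ++ [nxt.getD pn none]).set pn (some vals.length))
    (vn.1, vn.2, node_of.insert p.2 vals.length)

def merge_column_order_py_alt (parent_cols : List Int) (child_cols : List Int) : List Int :=
  let vals0 : List Int := 0 :: parent_cols
  let nxt0 : List (Option Nat) :=
    (List.range parent_cols.length).map (fun i => some (i + 1)) ++ [none]
  let node0 : PySem.Dict Int Nat :=
    parent_cols.zipIdx.foldl (fun d p => d.insert p.1 (p.2 + 1)) (PySem.Dict.empty)
  let st := (PySem.List.enumerate child_cols).foldl (pvStepB child_cols) (vals0, nxt0, node0)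
  pvWalk st.1 st.2.1 st.1.length (st.2.1.getD 0 none)

-- ===== PRECONDITION & SPEC =====
def Spec_merge_column_order_py (parent_cols : List Int) (child_cols : List Int) (out : List Int) : Prop := out = merge_column_order_py_alt parent_cols child_cols
instance (parent_cols : List Int) (child_cols : List Int) (out : List Int) : Decidable (Spec_merge_column_order_py parent_cols child_cols out) := by unfold Spec_merge_column_order_py; infer_instance

-- ===== CLAIM (what is proved, stated in full; the proofs are below) =====
def Claim_equal_merge_column_order_py : Prop := ∀ (parent_cols : List Int) (child_cols : List Int), Dom_merge_column_order_py parent_cols child_cols → Spec_merge_column_order_py parent_cols child_cols (merge_column_order_py parent_cols child_cols)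

-- ===== LEMMAS AND PROOFS =====

/-- index of the LAST occurrence of `c` in `xs` (the value A's `position` dict caches). -/
def lastIdx? : List Int → Int → Option Nat
  | [], _ => none
  | x :: xs, c =>
    match lastIdx? xs c with
    | some j => some (j + 1)
    | none => if x = c then some 0 else none

theorem lastIdx?_isSome (xs : List Int) (c : Int) : (lastIdx? xs c).isSome ↔ c ∈ xs := by
  induction xs with
  | nil => simp [lastIdx?]
  | cons x xs ih =>
    simp only [lastIdx?, List.mem_cons]
    rcases h : lastIdx? xs c with _ | j
    · simp [h] at ih
      by_cases hx : x = c <;> simp [hx, ih]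
      exact fun h' => (hx h'.symm)
    · simp [h] at ih ⊢
      right; exact ih

theorem lastIdx?_lt {xs : List Int} {c : Int} {j : Nat} (h : lastIdx? xs c = some j) :
    j < xs.length := by
  induction xs generalizing j with
  | nil => simp [lastIdx?] at h
  | cons x xs ih =>
    simp only [lastIdx?] at h
    rcases h' : lastIdx? xs c with _ | k <;> simp [h'] at h
    · rcases h with ⟨_, h2⟩; subst h2; simp
    · subst h; have := ih h'; simp; omega

theorem lastIdx?_append (xs ys : List Int) (c : Int) :
    lastIdx? (xs ++ ys) c =
      match lastIdx? ys c with
      | some j => some (xs.length + j)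
      | none => lastIdx? xs c := by
  induction xs with
  | nil => simp only [List.nil_append, List.length_nil]; rcases lastIdx? ys c <;> simp [lastIdx?]
  | cons x xs ih =>
    simp only [List.cons_append, lastIdx?, ih]
    rcases lastIdx? ys c with _ | j
    · simp
    · simp only []
      rcases lastIdx? xs c <;> simp <;> omega

theorem lastIdx?_eq_none_iff (xs : List Int) (c : Int) : lastIdx? xs c = none ↔ c ∉ xs := by
  rw [← lastIdx?_isSome xs c]
  rcases lastIdx? xs c <;> simp

/-- coupling invariant: A's `position` dict is exactly the last-occurrence index map of `order`. -/
def pvInv (order : List Int) (pos : PySem.Dict Int Int) : Prop :=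
  ∀ c : Int, pos.get? c = (lastIdx? order c).map (fun j => (j : Int))

theorem pvInv_contains {order : List Int} {pos : PySem.Dict Int Int} (h : pvInv order pos)
    (c : Int) : pos.contains c = decide (c ∈ order) := by
  rw [PySem.Dict.contains_eq_isSome_get?, h c]
  rcases h' : lastIdx? order c with _ | j
  · simp [← lastIdx?_isSome, h']
  · simp [← lastIdx?_isSome, h']

theorem enumerate_cons' {α : Type} (x : α) (xs : List α) (s : Int) :
    PySem.List.enumerate (x :: xs) s = (s, x) :: PySem.List.enumerate xs (s + 1) := rfl

theorem init_get (xs : List Int) (c : Int) : ∀ (s : Int) (d : PySem.Dict Int Int),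
    ((PySem.List.enumerate xs s).foldl (fun d p => d.insert p.2 p.1) d).get? c =
      match lastIdx? xs c with
      | some j => some (s + j)
      | none => d.get? c := by
  induction xs with
  | nil => intro s d; simp [PySem.List.enumerate, lastIdx?]
  | cons x xs ih =>
    intro s d
    rw [enumerate_cons']
    simp only [List.foldl_cons, ih (s + 1)]
    rcases h : lastIdx? xs c with _ | j
    · simp only [lastIdx?, h]
      by_cases hx : x = c
      · subst hx
        simp [PySem.Dict.get?_insert_self]
      · rw [PySem.Dict.get?_insert_of_ne (hne := fun hc => hx hc.symm)]
        simp [hx]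
    · simp only [lastIdx?, h]
      congr 1
      push_cast; ring

theorem pyRange_one_nil {a b : Int} (h : b ≤ a) : PySem.List.pyRange a b 1 = [] := by
  rw [PySem.List.pyRange_of_pos _ _ (by norm_num)]
  rw [if_neg (by omega)]
  simp

theorem pyRange_down_cons (m : Nat) :
    PySem.List.pyRange (m : Int) (-1) (-1) = (m : Int) :: PySem.List.pyRange ((m : Int) - 1) (-1) (-1) := by
  rw [PySem.List.pyRange_neg_one_eq_reverse, PySem.List.pyRange_neg_one_eq_reverse]
  have h1 : (-1 : Int) + 1 = 0 := by ring
  have h2 : (m : Int) + 1 = ((m + 1 : Nat) : Int) := by push_cast; ring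
  have h3 : (m : Int) - 1 + 1 = ((m : Nat) : Int) := by ring
  rw [h1, h2, h3, PySem.List.pyRange_zero_natCast, PySem.List.pyRange_zero_natCast]
  rw [List.range_succ]
  simp

theorem scan_pos (cs : List Int) (pos : PySem.Dict Int Int) : ∀ (n a : Nat),
    n = cs.length - a →
    pvScanA cs pos (PySem.List.pyRange (a : Int) (cs.length : Int) 1) =
      match (cs.drop a).find? (fun c => pos.contains c) with
      | some c => pos.get? c
      | none => none := by
  intro n
  induction n with
  | zero =>
    intro a hn
    rw [pyRange_one_nil (by omega : (cs.length : Int) ≤ (a : Int))]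
    rw [List.drop_of_length_le (by omega)]
    simp [pvScanA]
  | succ n ih =>
    intro a hn
    by_cases ha : a < cs.length
    · rw [PySem.List.pyRange_one_cons (by exact_mod_cast ha)]
      have hcast : (a : Int) + 1 = ((a + 1 : Nat) : Int) := by push_cast; ring
      have hdrop : cs.drop a = cs[a] :: cs.drop (a + 1) :=
        (List.getElem_cons_drop ha).symm
      simp only [pvScanA, PySem.List.pyGet?_natCast, List.getElem?_eq_getElem ha,
        Option.getD_some, hcast, ih (a + 1) (by omega), hdrop, List.find?_cons]
      by_cases hc : pos.contains cs[a] <;> simp [hc]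
    · rw [pyRange_one_nil (by omega : (cs.length : Int) ≤ (a : Int))]
      rw [List.drop_of_length_le (by omega)]
      simp [pvScanA]

theorem upd_get (order' : List Int) (c : Int) : ∀ (n i : Nat) (d : PySem.Dict Int Int),
    n = order'.length - i → i ≤ order'.length →
    ((PySem.List.pyRange (i : Int) (order'.length : Int) 1).foldl
        (fun d k => d.insert ((PySem.List.pyGet? order' k).getD 0) k) d).get? c =
      match lastIdx? (order'.drop i) c with
      | some j => some ((i + j : Nat) : Int)
      | none => d.get? c := by
  intro n
  induction n with
  | zero =>
    intro i d hn hi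
    rw [pyRange_one_nil (by omega : (order'.length : Int) ≤ (i : Int))]
    rw [List.drop_of_length_le (by omega)]
    simp [lastIdx?]
  | succ n ih =>
    intro i d hn hi
    by_cases hlt : i < order'.length
    · rw [PySem.List.pyRange_one_cons (by exact_mod_cast hlt)]
      have hcast : (i : Int) + 1 = ((i + 1 : Nat) : Int) := by push_cast; ring
      have hdrop : order'.drop i = order'[i] :: order'.drop (i + 1) :=
        (List.getElem_cons_drop hlt).symm
      simp only [List.foldl_cons, PySem.List.pyGet?_natCast, List.getElem?_eq_getElem hlt,
        Option.getD_some, hcast]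
      rw [ih (i + 1) _ (by omega) (by omega)]
      rw [hdrop]
      simp only [lastIdx?]
      rcases h' : lastIdx? (order'.drop (i + 1)) c with _ | j
      · by_cases hx : order'[i] = c
        · subst hx
          simp [PySem.Dict.get?_insert_self]
        · rw [PySem.Dict.get?_insert_of_ne (hne := fun hc => hx hc.symm)]
          simp [hx]
      · simp only []
        congr 1
        omega
    · rw [pyRange_one_nil (by omega : (order'.length : Int) ≤ (i : Int))]
      rw [List.drop_of_length_le (by omega)]
      simp [lastIdx?]

theorem step_inv {order : List Int} {pos : PySem.Dict Int Int} (hinv : pvInv order pos)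
    {col : Int} {i : Nat} (hi : i ≤ order.length) :
    pvInv (order.take i ++ col :: order.drop i)
      ((PySem.List.pyRange (i : Int) (((order.take i ++ col :: order.drop i).length : Nat) : Int) 1).foldl
        (fun d k => d.insert ((PySem.List.pyGet? (order.take i ++ col :: order.drop i) k).getD 0) k) pos) := by
  intro c
  set order' := order.take i ++ col :: order.drop i with horder'
  have hlen : (order.take i).length = i := by simp [List.length_take]; omega
  have hdrop : order'.drop i = col :: order.drop i := List.drop_left' hlen
  rw [upd_get order' c (order'.length - i) i pos rfl (by simp [horder']; omega)]
  rw [lastIdx?_append, hdrop, hlen]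
  rcases h' : lastIdx? (col :: order.drop i) c with _ | j
  · have hnot : c ∉ (col :: order.drop i) := (lastIdx?_eq_none_iff _ _).1 h'
    have hnd : lastIdx? (order.drop i) c = none :=
      (lastIdx?_eq_none_iff _ _).2 (fun hm => hnot (List.mem_cons_of_mem _ hm))
    rw [hinv c]
    conv_lhs => rw [← List.take_append_drop i order]
    rw [lastIdx?_append, hnd]
  · simp

theorem mem_insert_mid {order : List Int} {c x : Int} (i : Nat) (h : c ∈ order ∨ c = x) :
    c ∈ order.take i ++ x :: order.drop i := by
  rcases h with h | h
  · conv at h => rw [← List.take_append_drop i order]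
    rcases List.mem_append.1 h with h | h
    · exact List.mem_append.2 (Or.inl h)
    · exact List.mem_append.2 (Or.inr (List.mem_cons_of_mem _ h))
  · subst h; exact List.mem_append.2 (Or.inr (List.mem_cons_self))

-- ----- chain machinery for B's linked list -----

/-- `pvChain nxt i is`: starting at node `i`, the chain of `nxt` pointers visits exactly
the nodes of `is` and then stops. -/
def pvChain (nxt : List (Option Nat)) : Nat → List Nat → Prop
  | i, [] => nxt.getD i none = none
  | i, j :: js => nxt.getD i none = some j ∧ pvChain nxt j js

/-- the linked list `(vals, nxt)` (head sentinel node 0) represents `order` via node list `is`. -/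
def pvRep (vals : List Int) (nxt : List (Option Nat)) (is : List Nat) (order : List Int) : Prop :=
  pvChain nxt 0 is ∧ order = is.map (fun i => vals.getD i 0) ∧
  (0 :: is).Nodup ∧ (∀ k ∈ 0 :: is, k < vals.length) ∧ nxt.length = vals.length

/-- B's `node_of` dict maps each value to the node of its last occurrence in `order`. -/
def pvNodeInv (node_of : PySem.Dict Int Nat) (is : List Nat) (order : List Int) : Prop :=
  ∀ v : Int, node_of.get? v = (lastIdx? order v).map (fun j => is.getD j 0)

theorem pvNodeInv_contains {node_of : PySem.Dict Int Nat} {is : List Nat} {order : List Int}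
    (h : pvNodeInv node_of is order) (c : Int) : node_of.contains c = decide (c ∈ order) := by
  rw [PySem.Dict.contains_eq_isSome_get?, h c]
  rcases h' : lastIdx? order c with _ | j
  · simp [← lastIdx?_isSome, h']
  · simp [← lastIdx?_isSome, h']

theorem chain_last {nxt : List (Option Nat)} : ∀ {is : List Nat} {i : Nat},
    pvChain nxt i is → nxt.getD ((i :: is).getLast (by simp)) none = none := by
  intro is
  induction is with
  | nil => intro i h; simpa [pvChain] using h
  | cons j js ih => intro i h; exact ih h.2

theorem chain_split {nxt : List (Option Nat)} : ∀ {l : List Nat} {b : Nat} {r : List Nat} {i : Nat},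
    pvChain nxt i (l ++ b :: r) → nxt.getD ((i :: l).getLast (by simp)) none = some b := by
  intro l
  induction l with
  | nil => intro b r i h; exact h.1
  | cons c l ih => intro b r i h; exact ih h.2

theorem chain_preserve {nxt : List (Option Nat)} {q : Nat} {x : Option Nat} {y : Option Nat} :
    ∀ {js : List Nat} {j : Nat}, pvChain nxt j js → q ∉ (j :: js) →
      (∀ k ∈ j :: js, k < nxt.length) →
      pvChain ((nxt ++ [x]).set q y) j js := by
  intro js
  induction js with
  | nil =>
    intro j h hq hb
    have hj : j < nxt.length := hb j (by simp)
    simp only [pvChain] at h ⊢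
    rw [List.getD_eq_getElem?_getD, List.getElem?_set_ne (by simp at hq; omega)]
    rw [List.getElem?_append_left hj]
    rw [← List.getD_eq_getElem?_getD]
    exact h
  | cons b js ih =>
    intro j h hq hb
    have hj : j < nxt.length := hb j (by simp)
    refine ⟨?_, ih h.2 (by simp at hq ⊢; tauto) (fun k hk => hb k (by simp at hk ⊢; tauto))⟩
    rw [List.getD_eq_getElem?_getD, List.getElem?_set_ne (by simp at hq; omega)]
    rw [List.getElem?_append_left hj]
    rw [← List.getD_eq_getElem?_getD]
    exact h.1

theorem chain_insert {nxt : List (Option Nat)} :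
    ∀ {l r : List Nat} {i : Nat}, pvChain nxt i (l ++ r) → (i :: (l ++ r)).Nodup →
      (∀ k ∈ i :: (l ++ r), k < nxt.length) →
      pvChain ((nxt ++ [nxt.getD ((i :: l).getLast (by simp)) none]).set
          ((i :: l).getLast (by simp)) (some nxt.length)) i (l ++ nxt.length :: r) := by
  intro l
  induction l with
  | nil =>
    intro r i h hnd hb
    have hi : i < nxt.length := hb i (by simp)
    constructor
    · simp only [List.getLast_singleton]
      rw [List.getD_eq_getElem?_getD, List.getElem?_set_self (by simp; omega)]
      rfl
    · have hm : nxt.length ≠ i := by omega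
      have hget : ((nxt ++ [nxt.getD i none]).set i (some nxt.length)).getD nxt.length none =
          nxt.getD i none := by
        rw [List.getD_eq_getElem?_getD, List.getElem?_set_ne (by omega)]
        rw [List.getElem?_append_right (by omega)]
        simp
      rcases r with _ | ⟨b, r'⟩
      · simp only [pvChain, List.getLast_singleton]
        rw [hget]
        simpa [pvChain] using h
      · simp only [pvChain, List.getLast_singleton] at h ⊢
        refine ⟨by rw [hget]; exact h.1, ?_⟩
        refine chain_preserve h.2 ?_ ?_
        · simp only [List.nodup_cons, List.nil_append, List.mem_cons] at hnd
          intro hc; exact hnd.1 (by simpa using hc)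
        · intro k hk; exact hb k (by simp at hk ⊢; tauto)
  | cons c l ih =>
    intro r i h hnd hb
    have hi : i < nxt.length := hb i (by simp)
    have hlast : ((i :: c :: l).getLast (by simp)) = ((c :: l).getLast (by simp)) := by
      exact List.getLast_cons (by simp)
    rw [hlast]
    constructor
    · have hqi : ((c :: l).getLast (by simp)) ≠ i := by
        intro hc
        have : i ∈ c :: l := hc ▸ List.getLast_mem (by simp)
        simp only [List.nodup_cons] at hnd
        exact hnd.1 (by simp at this ⊢; tauto)
      rw [List.getD_eq_getElem?_getD, List.getElem?_set_ne (by omega)]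
      rw [List.getElem?_append_left hi, ← List.getD_eq_getElem?_getD]
      exact h.1
    · exact ih h.2 (List.Nodup.of_cons (by simpa using hnd))
        (fun k hk => hb k (by simp at hk ⊢; tauto))

theorem walk_chain (vals : List Int) (nxt : List (Option Nat)) :
    ∀ (is : List Nat) (i fuel : Nat), pvChain nxt i is → is.length ≤ fuel →
      pvWalk vals nxt fuel (nxt.getD i none) = is.map (fun k => vals.getD k 0) := by
  intro is
  induction is with
  | nil => intro i fuel h _; rw [(h : nxt.getD i none = none)]; cases fuel <;> rfl
  | cons j js ih =>
    intro i fuel h hf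
    rcases fuel with _ | f
    · simp at hf
    · rw [h.1]
      simp only [pvWalk, List.map_cons]
      rw [ih j f h.2 (by simpa using hf)]

theorem findLast_chain {nxt : List (Option Nat)} :
    ∀ (is : List Nat) (q fuel : Nat), pvChain nxt q is → is.length ≤ fuel →
      pvFindLast nxt fuel q = (q :: is).getLast (by simp) := by
  intro is
  induction is with
  | nil =>
    intro q fuel h _
    cases fuel with
    | zero => rfl
    | succ f => simp only [pvFindLast]; rw [(h : nxt.getD q none = none)]; rfl
  | cons j js ih =>
    intro q fuel h hf
    rcases fuel with _ | f
    · simp at hf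
    · simp only [pvFindLast]
      rw [h.1]
      exact (ih j f h.2 (by simpa using hf)).trans (List.getLast_cons (by simp)).symm

theorem findPred_chain {nxt : List (Option Nat)} {a : Nat} :
    ∀ (l : List Nat) (r : List Nat) (q fuel : Nat), pvChain nxt q (l ++ a :: r) → a ∉ l →
      l.length < fuel →
      pvFindPred nxt a fuel q = (q :: l).getLast (by simp) := by
  intro l
  induction l with
  | nil =>
    intro r q fuel h _ hf
    rcases fuel with _ | f
    · omega
    · simp only [pvFindPred]
      rw [if_pos h.1]
      rfl
  | cons b l ih =>
    intro r q fuel h ha hf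
    rcases fuel with _ | f
    · simp at hf
    · simp only [pvFindPred]
      have hba : b ≠ a := by simp at ha; tauto
      rw [if_neg (by rw [h.1]; simp [hba]), h.1]
      exact (ih r b f h.2 (by simp at ha; tauto) (by simpa using hf)).trans
        (List.getLast_cons (by simp)).symm

-- getD on node lists take/drop splices
theorem getD_splice_left {is l r : List Nat} {m j : Nat} (h : is = l ++ r) (hj : j < l.length) :
    (l ++ m :: r).getD j 0 = is.getD j 0 := by
  subst h
  rw [List.getD_eq_getElem?_getD, List.getD_eq_getElem?_getD,
    List.getElem?_append_left hj, List.getElem?_append_left hj]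

theorem getD_splice_right {is l r : List Nat} {m j : Nat} (h : is = l ++ r) :
    (l ++ m :: r).getD (l.length + 1 + j) 0 = is.getD (l.length + j) 0 := by
  subst h
  rw [List.getD_eq_getElem?_getD, List.getD_eq_getElem?_getD,
    List.getElem?_append_right (by omega), List.getElem?_append_right (by omega)]
  have h1 : l.length + 1 + j - l.length = j + 1 := by omega
  have h2 : l.length + j - l.length = j := by omega
  rw [h1, h2]
  rfl

theorem getD_splice_mid {l r : List Nat} {m : Nat} :
    (l ++ m :: r).getD l.length 0 = m := by
  rw [List.getD_eq_getElem?_getD, List.getElem?_append_right (le_refl _)]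
  simp

/-- the common update: value `x ∉ order` is spliced at position `l.length`,
as the fresh node `vals.length` whose predecessor is `(0 :: l).getLast`. -/
theorem insert_sim {vals : List Int} {nxt : List (Option Nat)} {is l r : List Nat}
    {order : List Int} {node_of : PySem.Dict Int Nat} {x : Int}
    (hrep : pvRep vals nxt is order) (hnode : pvNodeInv node_of is order)
    (hsplit : is = l ++ r) (hx : x ∉ order) :
    pvRep (vals ++ [x])
      ((nxt ++ [nxt.getD ((0 :: l).getLast (by simp)) none]).set
        ((0 :: l).getLast (by simp)) (some vals.length))
      (l ++ vals.length :: r)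
      (order.take l.length ++ x :: order.drop l.length) ∧
    pvNodeInv (node_of.insert x vals.length) (l ++ vals.length :: r)
      (order.take l.length ++ x :: order.drop l.length) ∧
    l.length ≤ order.length := by
  obtain ⟨hch, hmap, hnd, hb, hlen⟩ := hrep
  have hlis : order.length = is.length := by rw [hmap]; simp
  have hll : l.length ≤ order.length := by rw [hlis, hsplit]; simp
  have hm : vals.length ∉ (0 :: is) := fun hc => by have := hb _ hc; omega
  have hbl : ∀ k ∈ 0 :: is, k < nxt.length := by rw [hlen]; exact hb
  have hch' : pvChain ((nxt ++ [nxt.getD ((0 :: l).getLast (by simp)) none]).set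
      ((0 :: l).getLast (by simp)) (some nxt.length)) 0 (l ++ nxt.length :: r) := by
    have := @chain_insert nxt l r 0 (hsplit ▸ hch) (hsplit ▸ hnd) (hsplit ▸ hbl)
    exact this
  rw [hlen] at hch'
  have htake : order.take l.length = l.map (fun i => vals.getD i 0) := by
    rw [hmap, hsplit, List.map_append, List.take_left']
    simp
  have hdrop : order.drop l.length = r.map (fun i => vals.getD i 0) := by
    rw [hmap, hsplit, List.map_append, List.drop_left']
    simp
  have hvals' : ∀ k ∈ 0 :: is, (vals ++ [x]).getD k 0 = vals.getD k 0 := by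
    intro k hk
    have := hb k hk
    rw [List.getD_eq_getElem?_getD, List.getElem?_append_left this,
      ← List.getD_eq_getElem?_getD]
  have hmap' : order.take l.length ++ x :: order.drop l.length =
      (l ++ vals.length :: r).map (fun i => (vals ++ [x]).getD i 0) := by
    rw [List.map_append, List.map_cons, htake, hdrop]
    congr 1
    · apply List.map_congr_left
      intro k hk
      exact (hvals' k (by rw [hsplit]; simp [hk])).symm
    · congr 1
      · rw [List.getD_eq_getElem?_getD, List.getElem?_append_right (le_refl _)]
        simp
      · apply List.map_congr_left
        intro k hk
        exact (hvals' k (by rw [hsplit]; simp [hk])).symm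
  have hnd' : (0 :: (l ++ vals.length :: r)).Nodup := by
    rw [hsplit] at hnd hm
    have hperm : (0 :: (l ++ vals.length :: r)).Perm (vals.length :: 0 :: (l ++ r)) :=
      (List.Perm.cons 0 List.perm_middle).trans (List.Perm.swap _ _ _)
    exact hperm.nodup_iff.2 (List.nodup_cons.2 ⟨hm, hnd⟩)
  have hb' : ∀ k ∈ 0 :: (l ++ vals.length :: r), k < (vals ++ [x]).length := by
    intro k hk
    simp only [List.length_append, List.length_cons, List.length_nil]
    simp only [List.mem_cons, List.mem_append] at hk
    rcases hk with hk | hk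
    · subst hk; have := hb 0 (by simp); omega
    · rcases hk with hk | hk
      · have := hb k (by rw [hsplit]; simp [hk]); omega
      · rcases hk with hk | hk
        · omega
        · have := hb k (by rw [hsplit]; simp [hk]); omega
  refine ⟨⟨hch', hmap', hnd', hb', by simp [hlen]⟩, ?_, hll⟩
  -- node_of invariant
  intro v
  by_cases hv : v = x
  · subst hv
    rw [PySem.Dict.get?_insert_self]
    have hxd : v ∉ order.drop l.length := fun hc => hx (List.mem_of_mem_drop hc)
    have h1 : lastIdx? (v :: order.drop l.length) v = some 0 := by
      rw [show lastIdx? (v :: order.drop l.length) v =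
        match lastIdx? (order.drop l.length) v with
        | some j => some (j + 1)
        | none => if v = v then some 0 else none from rfl]
      rw [(lastIdx?_eq_none_iff _ _).2 hxd]
      simp
    rw [lastIdx?_append, h1]
    simp only [Option.map_some]
    have : (order.take l.length).length = l.length := by
      rw [List.length_take]; omega
    rw [this]
    rw [show l.length + 0 = l.length by omega]
    rw [getD_splice_mid]
  · rw [PySem.Dict.get?_insert_of_ne (hne := hv), hnode v]
    have h1 : lastIdx? (x :: order.drop l.length) v =
        match lastIdx? (order.drop l.length) v with
        | some j => some (j + 1)
        | none => none := by
      rw [show lastIdx? (x :: order.drop l.length) v =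
        match lastIdx? (order.drop l.length) v with
        | some j => some (j + 1)
        | none => if x = v then some 0 else none from rfl]
      rcases lastIdx? (order.drop l.length) v with _ | j
      · rw [if_neg (fun hc => hv hc.symm)]
      · rfl
    have htl : (order.take l.length).length = l.length := by rw [List.length_take]; omega
    have horder2 : lastIdx? order v =
        match lastIdx? (order.drop l.length) v with
        | some j => some (l.length + j)
        | none => lastIdx? (order.take l.length) v := by
      conv_lhs => rw [← List.take_append_drop l.length order]
      rw [lastIdx?_append, htl]
    rw [lastIdx?_append, h1, htl, horder2]
    rcases hld : lastIdx? (order.drop l.length) v with _ | j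
    · rcases hlt : lastIdx? (order.take l.length) v with _ | j
      · rfl
      · simp only [Option.map_some]
        have hjl : j < l.length := htl ▸ lastIdx?_lt hlt
        rw [getD_splice_left hsplit hjl]
    · simp only [Option.map_some]
      rw [show l.length + (j + 1) = l.length + 1 + j by omega]
      rw [getD_splice_right hsplit]

theorem insert_inv {order : List Int} {pos : PySem.Dict Int Int} (hinv : pvInv order pos)
    {x : Int} {i : Nat} (hi : i ≤ order.length) :
    pvInv (PySem.List.insert order (i : Int) x)
      ((PySem.List.pyRange (i : Int) (((PySem.List.insert order (i : Int) x).length : Nat) : Int) 1).foldl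
        (fun d k => d.insert ((PySem.List.pyGet? (PySem.List.insert order (i : Int) x) k).getD 0) k) pos) := by
  rw [PySem.List.insert_natCast order i x hi]
  exact step_inv hinv hi

theorem getD_eq_getElem_nat {is : List Nat} {j : Nat} (hj : j < is.length) :
    is.getD j 0 = is[j] := by
  rw [List.getD_eq_getElem?_getD, List.getElem?_eq_getElem hj]
  rfl

theorem getLast_cons_take {is : List Nat} {j : Nat} (hj : j < is.length) :
    (0 :: is.take (j + 1)).getLast (by simp) = is[j] := by
  have hne : is.take (j + 1) ≠ [] :=
    List.ne_nil_of_length_pos (by rw [List.length_take]; omega)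
  rw [List.getLast_cons hne, List.getLast_eq_getElem]
  have hlen : (is.take (j + 1)).length = j + 1 := by simp; omega
  simp only [hlen, Nat.add_sub_cancel]
  rw [List.getElem_take]

theorem take_getElem_drop {is : List Nat} {j : Nat} (hj : j < is.length) :
    is = is.take j ++ is[j] :: is.drop (j + 1) := by
  conv_lhs => rw [← List.take_append_drop j is]
  rw [List.getElem_cons_drop hj]

theorem nodup_length_le {is : List Nat} {n : Nat} (hnd : (0 :: is).Nodup)
    (hb : ∀ k ∈ 0 :: is, k < n) : is.length < n := by
  have h1 : (0 :: is).length ≤ n := by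
    have hsub : (0 :: is).toFinset ⊆ Finset.range n := by
      intro k hk
      simp only [List.mem_toFinset] at hk
      simpa using hb k hk
    have := Finset.card_le_card hsub
    rw [List.toFinset_card_of_nodup hnd, Finset.card_range] at this
    exact this
  simpa using h1

theorem not_mem_take_of_nodup {is : List Nat} {j : Nat} (hj : j < is.length) (hnd : is.Nodup) :
    is[j] ∉ is.take j := by
  intro hmem
  have hsp : (is.take j ++ is.drop j).Nodup := by rw [List.take_append_drop]; exact hnd
  have hdis := (List.nodup_append.1 hsp).2.2
  have hin : is[j] ∈ is.drop j := by
    rw [← List.getElem_cons_drop hj]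
    exact List.mem_cons_self
  exact hdis _ hmem _ hin rfl

/-- one child column: A's step and B's step stay coupled. -/
theorem step_key {cs pre suf order : List Int} {x : Int} {pos : PySem.Dict Int Int}
    {vals : List Int} {nxt : List (Option Nat)} {node_of : PySem.Dict Int Nat} {is : List Nat}
    (hcs : cs = pre ++ x :: suf) (hinv : pvInv order pos) (hpre : ∀ c ∈ pre, c ∈ order)
    (hrep : pvRep vals nxt is order) (hnode : pvNodeInv node_of is order) :
    ∃ (o₁ : List Int) (p₁ : PySem.Dict Int Int) (v₁ : List Int) (n₁ : List (Option Nat))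
      (d₁ : PySem.Dict Int Nat) (is₁ : List Nat),
      pvStepA cs (order, pos) ((pre.length : Int), x) = (o₁, p₁) ∧
      pvStepB cs (vals, nxt, node_of) ((pre.length : Int), x) = (v₁, n₁, d₁) ∧
      pvInv o₁ p₁ ∧ pvRep v₁ n₁ is₁ o₁ ∧ pvNodeInv d₁ is₁ o₁ ∧
      (∀ c, c ∈ order ∨ c = x → c ∈ o₁) := by
  by_cases hx : x ∈ order
  · refine ⟨order, pos, vals, nxt, node_of, is, ?_, ?_, hinv, hrep, hnode, ?_⟩
    · simp only [pvStepA]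
      rw [if_pos (by rw [pvInv_contains hinv]; simpa using hx)]
    · simp only [pvStepB]
      rw [if_pos (by rw [pvNodeInv_contains hnode]; simpa using hx)]
    · intro c hc
      rcases hc with hc | hc
      · exact hc
      · subst hc; exact hx
  · obtain ⟨hch, hmap, hnd, hb, hlenv⟩ := hrep
    have hlis : order.length = is.length := by rw [hmap]; simp
    have hfuel : is.length < vals.length := nodup_length_le hnd hb
    have hndis : is.Nodup := List.Nodup.of_cons hnd
    obtain ⟨l, r, hsplit, hlle, hAat, hBat⟩ :
        ∃ l r : List Nat, is = l ++ r ∧ l.length ≤ order.length ∧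
          (match pvScanA cs pos (PySem.List.pyRange ((pre.length : Int) - 1) (-1) (-1)) with
            | some lv => lv + 1
            | none =>
              match pvScanA cs pos (PySem.List.pyRange ((pre.length : Int) + 1) (cs.length : Int) 1) with
              | some rv => rv
              | none => (order.length : Int)) = ((l.length : Nat) : Int) ∧
          (if (pre.length : Int) = 0 then
              match (PySem.List.slice cs (some 1)).find? (fun c => node_of.contains c) with
              | none =>
                (vals ++ [x], (nxt ++ [(none : Option Nat)]).set
                  (pvFindLast nxt vals.length 0) (some vals.length))
              | some a =>
                (vals ++ [x], (nxt ++ [some ((node_of.get? a).getD 0)]).set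
                  (pvFindPred nxt ((node_of.get? a).getD 0) vals.length 0) (some vals.length))
            else
              (vals ++ [x], (nxt ++ [nxt.getD
                  ((node_of.get? ((PySem.List.pyGet? cs ((pre.length : Int) - 1)).getD 0)).getD 0) none]).set
                ((node_of.get? ((PySem.List.pyGet? cs ((pre.length : Int) - 1)).getD 0)).getD 0)
                (some vals.length)))
          = (vals ++ [x], (nxt ++ [nxt.getD ((0 :: l).getLast (by simp)) none]).set
              ((0 :: l).getLast (by simp)) (some vals.length)) := by
      rcases pre with _ | ⟨y, pre'⟩
      · -- first child column: A's left scan is empty, both look for the forward anchor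
        have hleft : PySem.List.pyRange ((([] : List Int).length : Int) - 1) (-1) (-1) = [] := by decide
        have hone : (([] : List Int).length : Int) + 1 = ((1 : Nat) : Int) := by norm_num
        have hpredA : (fun c => pos.contains c) = (fun c => decide (c ∈ order)) :=
          funext (pvInv_contains hinv)
        have hpredB : (fun c => node_of.contains c) = (fun c => decide (c ∈ order)) :=
          funext (pvNodeInv_contains hnode)
        have hright := scan_pos cs pos (cs.length - 1) 1 rfl
        rw [hpredA] at hright
        rcases hfind : (cs.drop 1).find? (fun c => decide (c ∈ order)) with _ | a
        · refine ⟨is, [], by simp, by omega, ?_, ?_⟩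
          · rw [hleft, hone, hright, hfind]
            show ((order.length : Int)) = ((is.length : Nat) : Int)
            rw [hlis]
          · rw [if_pos (by simp)]
            rw [hpredB, PySem.List.slice_from_one, ← List.drop_one, hfind]
            show (vals ++ [x], (nxt ++ [(none : Option Nat)]).set
                (pvFindLast nxt vals.length 0) (some vals.length)) = _
            have hq : pvFindLast nxt vals.length 0 = (0 :: is).getLast (by simp) :=
              findLast_chain is 0 vals.length hch (by omega)
            have hcell : nxt.getD ((0 :: is).getLast (by simp)) none = (none : Option Nat) :=
              chain_last hch
            rw [hq, hcell]
        · have ha : a ∈ order := by simpa using List.find?_some hfind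
          obtain ⟨j, hj⟩ : ∃ j, lastIdx? order a = some j :=
            Option.isSome_iff_exists.1 ((lastIdx?_isSome order a).2 ha)
          have hjo : j < order.length := lastIdx?_lt hj
          have hjis : j < is.length := by omega
          have hlenl : (is.take j).length = j := by simp; omega
          refine ⟨is.take j, is.drop j, (List.take_append_drop j is).symm, by omega, ?_, ?_⟩
          · rw [hleft, hone, hright, hfind]
            show (match pos.get? a with
              | some rv => rv
              | none => (order.length : Int)) = (((is.take j).length : Nat) : Int)
            rw [hinv a, hj, hlenl]
            simp
          · rw [if_pos (by simp)]
            rw [hpredB, PySem.List.slice_from_one, ← List.drop_one, hfind]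
            show (vals ++ [x], (nxt ++ [some ((node_of.get? a).getD 0)]).set
                (pvFindPred nxt ((node_of.get? a).getD 0) vals.length 0) (some vals.length)) = _
            have han : (node_of.get? a).getD 0 = is[j] := by
              rw [hnode a, hj]
              simp only [Option.map_some, Option.getD_some]
              exact getD_eq_getElem_nat hjis
            have hch2 : pvChain nxt 0 (is.take j ++ is[j] :: is.drop (j + 1)) := by
              rw [← take_getElem_drop hjis]; exact hch
            have hq : pvFindPred nxt is[j] vals.length 0 = (0 :: is.take j).getLast (by simp) :=
              findPred_chain (is.take j) (is.drop (j + 1)) 0 vals.length hch2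
                (not_mem_take_of_nodup hjis hndis) (by rw [hlenl]; omega)
            have hcell : some is[j] = nxt.getD ((0 :: is.take j).getLast (by simp)) none :=
              (chain_split hch2).symm
            rw [han, hq, hcell]
      · -- later child column: the previous child column is already placed
        set pre := y :: pre' with hpre'
        have hlen1 : 1 ≤ pre.length := by simp [hpre']
        have harg : (pre.length : Int) - 1 = ((pre.length - 1 : Nat) : Int) := by omega
        have hmlt : pre.length - 1 < cs.length := by
          subst hcs; simp; omega
        have hprem : cs[pre.length - 1]'hmlt ∈ order := by
          apply hpre
          have : cs[pre.length - 1]'hmlt = pre[pre.length - 1]'(by omega) := by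
            subst hcs; exact List.getElem_append_left (by omega)
          rw [this]; exact List.getElem_mem _
        obtain ⟨j, hj⟩ : ∃ j, lastIdx? order (cs[pre.length - 1]'hmlt) = some j :=
          Option.isSome_iff_exists.1 ((lastIdx?_isSome order _).2 hprem)
        have hjo : j < order.length := lastIdx?_lt hj
        have hjis : j < is.length := by omega
        have hgd : (PySem.List.pyGet? cs ((pre.length : Int) - 1)).getD 0 = cs[pre.length - 1]'hmlt := by
          rw [harg, PySem.List.pyGet?_natCast, List.getElem?_eq_getElem hmlt, Option.getD_some]
        have hleft : pvScanA cs pos (PySem.List.pyRange ((pre.length : Int) - 1) (-1) (-1)) =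
            some (j : Int) := by
          rw [harg, pyRange_down_cons]
          simp only [pvScanA]
          rw [← harg, hgd]
          rw [if_pos (by rw [pvInv_contains hinv]; simpa using hprem)]
          rw [hinv _, hj]; rfl
        have hlenl : (is.take (j + 1)).length = j + 1 := by simp; omega
        refine ⟨is.take (j + 1), is.drop (j + 1), (List.take_append_drop (j + 1) is).symm,
          by omega, ?_, ?_⟩
        · rw [hleft, hlenl]
          show (j : Int) + 1 = ((j + 1 : Nat) : Int)
          push_cast
          ring
        · rw [if_neg (by omega)]
          have hpn : (node_of.get? ((PySem.List.pyGet? cs ((pre.length : Int) - 1)).getD 0)).getD 0 =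
              is[j] := by
            rw [hgd, hnode _, hj]
            simp only [Option.map_some, Option.getD_some]
            exact getD_eq_getElem_nat hjis
          have hq : ((0 :: is.take (j + 1)).getLast (by simp)) = is[j] := getLast_cons_take hjis
          rw [hpn, hq]
    -- common tail: both sides perform the same splice at position l.length
    have hcontA : pos.contains x = false := by
      rw [pvInv_contains hinv]; simpa using hx
    have hcontB : node_of.contains x = false := by
      rw [pvNodeInv_contains hnode]; simpa using hx
    have hA : pvStepA cs (order, pos) ((pre.length : Int), x) =
        (PySem.List.insert order ((l.length : Nat) : Int) x,
          (PySem.List.pyRange ((l.length : Nat) : Int)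
              (((PySem.List.insert order ((l.length : Nat) : Int) x).length : Nat) : Int) 1).foldl
            (fun d k => d.insert
              ((PySem.List.pyGet? (PySem.List.insert order ((l.length : Nat) : Int) x) k).getD 0) k)
            pos) := by
      simp only [pvStepA]
      rw [if_neg (by simp [hcontA])]
      simp only [hAat]
    have hB : pvStepB cs (vals, nxt, node_of) ((pre.length : Int), x) =
        (vals ++ [x], (nxt ++ [nxt.getD ((0 :: l).getLast (by simp)) none]).set
          ((0 :: l).getLast (by simp)) (some vals.length), node_of.insert x vals.length) := by
      simp only [pvStepB]
      rw [if_neg (by simp [hcontB])]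
      rw [hBat]
    obtain ⟨hrepN, hnodeN, -⟩ :=
      insert_sim ⟨hch, hmap, hnd, hb, hlenv⟩ hnode hsplit hx
    have hins : PySem.List.insert order ((l.length : Nat) : Int) x =
        order.take l.length ++ x :: order.drop l.length :=
      PySem.List.insert_natCast order l.length x hlle
    refine ⟨_, _, _, _, _, l ++ vals.length :: r, hA, hB, ?_, ?_, ?_, ?_⟩
    · exact insert_inv hinv hlle
    · rw [hins]; exact hrepN
    · rw [hins]; exact hnodeN
    · intro c hc
      rw [hins]; exact mem_insert_mid _ hc

theorem main_lemma (cs : List Int) : ∀ (suf pre order : List Int) (pos : PySem.Dict Int Int)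
    (vals : List Int) (nxt : List (Option Nat)) (node_of : PySem.Dict Int Nat) (is : List Nat),
    cs = pre ++ suf → pvInv order pos → (∀ c ∈ pre, c ∈ order) →
    pvRep vals nxt is order → pvNodeInv node_of is order →
    ∃ is' : List Nat,
      pvRep (((PySem.List.enumerate suf ((pre.length : Nat) : Int)).foldl (pvStepB cs)
          (vals, nxt, node_of)).1)
        (((PySem.List.enumerate suf ((pre.length : Nat) : Int)).foldl (pvStepB cs)
          (vals, nxt, node_of)).2.1)
        is'
        (((PySem.List.enumerate suf ((pre.length : Nat) : Int)).foldl (pvStepA cs)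
          (order, pos)).1) := by
  intro suf
  induction suf with
  | nil =>
    intro pre order pos vals nxt node_of is _ _ _ hrep _
    exact ⟨is, by simpa [PySem.List.enumerate] using hrep⟩
  | cons x suf ih =>
    intro pre order pos vals nxt node_of is hcs hinv hpre hrep hnode
    rw [enumerate_cons']
    simp only [List.foldl_cons]
    obtain ⟨o₁, p₁, v₁, n₁, d₁, is₁, hA, hB, hinv₁, hrep₁, hnode₁, hmem₁⟩ :=
      step_key (by simpa using hcs) hinv hpre hrep hnode
    rw [hA, hB]
    have hcast : (pre.length : Int) + 1 = (((pre ++ [x]).length : Nat) : Int) := by simp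
    rw [hcast]
    refine ih (pre ++ [x]) o₁ p₁ v₁ n₁ d₁ is₁ (by simpa using hcs) hinv₁ ?_ hrep₁ hnode₁
    intro c hc
    rcases List.mem_append.1 hc with hc | hc
    · exact hmem₁ c (Or.inl (hpre c hc))
    · exact hmem₁ c (Or.inr (by simpa using hc))

-- ----- initial state of B's linked list -----

theorem chain_init (n : Nat) : ∀ (m k : Nat), k ≤ n → m = n - k →
    pvChain ((List.range n).map (fun i => some (i + 1)) ++ [none]) k (List.range' (k + 1) m) := by
  intro m
  induction m with
  | zero =>
    intro k hk hm
    have hkn : k = n := by omega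
    subst hkn
    show ((List.range k).map (fun i => some (i + 1)) ++ [none]).getD k none = none
    rw [List.getD_eq_getElem?_getD, List.getElem?_append_right (by simp)]
    simp
  | succ m ih =>
    intro k hk hm
    have hkn : k < n := by omega
    rw [List.range'_succ]
    refine ⟨?_, ih (k + 1) (by omega) (by omega)⟩
    rw [List.getD_eq_getElem?_getD, List.getElem?_append_left (by simp [hkn]),
      List.getElem?_map, List.getElem?_range hkn]
    rfl

theorem map_getD_range' (p : List Int) :
    p = (List.range' 1 p.length).map (fun i => ((0 : Int) :: p).getD i 0) := by
  apply List.ext_getElem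
  · simp
  · intro k hk1 hk2
    simp only [List.getElem_map, List.getElem_range']
    rw [show 1 + 1 * k = k + 1 by omega]
    rw [List.getD_eq_getElem?_getD]
    simp only [List.getElem?_cons_succ]
    rw [List.getElem?_eq_getElem hk1]
    rfl

theorem getD_range'_one {n j : Nat} (hj : j < n) : (List.range' 1 n).getD j 0 = j + 1 := by
  rw [List.getD_eq_getElem?_getD, List.getElem?_eq_getElem (by simp [hj])]
  simp [List.getElem_range']
  omega

theorem node_init (xs : List Int) (c : Int) : ∀ (s : Nat) (d : PySem.Dict Int Nat),
    ((xs.zipIdx s).foldl (fun d p => d.insert p.1 (p.2 + 1)) d).get? c =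
      match lastIdx? xs c with
      | some j => some (s + j + 1)
      | none => d.get? c := by
  induction xs with
  | nil => intro s d; simp [lastIdx?]
  | cons x xs ih =>
    intro s d
    rw [List.zipIdx_cons]
    simp only [List.foldl_cons, ih (s + 1)]
    rcases h : lastIdx? xs c with _ | j
    · simp only [lastIdx?, h]
      by_cases hx : x = c
      · subst hx
        simp [PySem.Dict.get?_insert_self]
      · rw [PySem.Dict.get?_insert_of_ne (hne := fun hc => hx hc.symm)]
        simp [hx]
    · simp only [lastIdx?, h]
      congr 1
      omega

theorem pv_ports_eq (parent_cols child_cols : List Int) :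
    merge_column_order_py parent_cols child_cols = merge_column_order_py_alt parent_cols child_cols := by
  unfold merge_column_order_py merge_column_order_py_alt
  have hinv : pvInv parent_cols ((PySem.List.enumerate parent_cols).foldl
      (fun d p => d.insert p.2 p.1) (PySem.Dict.empty)) := by
    intro c
    rw [init_get parent_cols c 0 PySem.Dict.empty]
    rcases lastIdx? parent_cols c <;> simp
  have hrep0 : pvRep ((0 : Int) :: parent_cols)
      ((List.range parent_cols.length).map (fun i => some (i + 1)) ++ [none])
      (List.range' 1 parent_cols.length) parent_cols := by
    refine ⟨?_, map_getD_range' parent_cols, ?_, ?_, by simp⟩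
    · have := chain_init parent_cols.length parent_cols.length 0 (by omega) (by omega)
      simpa using this
    · rw [List.nodup_cons]
      refine ⟨?_, List.nodup_range'⟩
      simp
    · intro k hk
      rcases List.mem_cons.1 hk with hk | hk
      · simp [hk]
      · have := List.mem_range'_1.1 hk
        simp
        omega
  have hnode0 : pvNodeInv (parent_cols.zipIdx.foldl
      (fun d p => d.insert p.1 (p.2 + 1)) (PySem.Dict.empty))
      (List.range' 1 parent_cols.length) parent_cols := by
    intro v
    rw [node_init parent_cols v 0 PySem.Dict.empty]
    rcases h : lastIdx? parent_cols v with _ | j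
    · simp
    · have hj : j < parent_cols.length := lastIdx?_lt h
      simp only [Option.map_some]
      rw [getD_range'_one hj]
      congr 1
      omega
  obtain ⟨is', hrep'⟩ := main_lemma child_cols child_cols [] parent_cols _
    ((0 : Int) :: parent_cols)
    ((List.range parent_cols.length).map (fun i => some (i + 1)) ++ [none])
    (parent_cols.zipIdx.foldl (fun d p => d.insert p.1 (p.2 + 1)) (PySem.Dict.empty))
    (List.range' 1 parent_cols.length)
    (by simp) hinv (by simp) hrep0 hnode0
  obtain ⟨hch', hmap', hnd', hb', hlen'⟩ := hrep'
  simp only [List.length_nil, Nat.cast_zero] at hch' hmap' hnd' hb'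
  have hfuel := nodup_length_le hnd' hb'
  rw [hmap']
  exact (walk_chain _ _ is' 0 _ hch' hfuel.le).symm

-- ===== VERDICT (by name: the statement is the Claim_ definition above) =====
theorem merge_column_order_py_spec : Claim_equal_merge_column_order_py := by
  intro parent_cols child_cols _
  unfold Spec_merge_column_order_py
  exact pv_ports_eq parent_cols child_cols
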